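-- pv_equiv track=rewrite | github.com/akashnigam/Bowler | bowler/helpers.py | dotted_parts
-- ===== SOURCE A (Python) =====
-- from typing import List, Optional
--
-- def dotted_parts(name: str) -> List[str]:
--     pre, dot, post = name.partition(".")
--     if post:
--         post_parts = dotted_parts(post)
--     else:
--         post_parts = []
--     result = []
--     if pre:
--         result.append(pre)
--     if pre and dot:
--         result.append(dot)
--     if post_parts:
--         result.extend(post_parts)
--     return result
-- ===== SOURCE B (Python) =====
-- def dotted_parts(name):
--     # Split once, then one flat pass: every nonempty segment is emitted,
--     # followed by a "." whenever another segment comes after it.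
--     parts = name.split('.')
--     out = []
--     for seg in parts[:-1]:
--         if seg:
--             out.append(seg)
--             out.append('.')
--     last = parts[-1]
--     if last:
--         out.append(last)
--     return out
-- ===== Notes on version B (the rewrite author's own statement) =====
-- stated objective: alternative
-- what changed: Replaces A's self-recursion over repeated partition calls with a single dot-split followed by one flat loop that appends each nonempty segment plus a dot separator whenever another segment follows it.
import Mathlib
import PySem

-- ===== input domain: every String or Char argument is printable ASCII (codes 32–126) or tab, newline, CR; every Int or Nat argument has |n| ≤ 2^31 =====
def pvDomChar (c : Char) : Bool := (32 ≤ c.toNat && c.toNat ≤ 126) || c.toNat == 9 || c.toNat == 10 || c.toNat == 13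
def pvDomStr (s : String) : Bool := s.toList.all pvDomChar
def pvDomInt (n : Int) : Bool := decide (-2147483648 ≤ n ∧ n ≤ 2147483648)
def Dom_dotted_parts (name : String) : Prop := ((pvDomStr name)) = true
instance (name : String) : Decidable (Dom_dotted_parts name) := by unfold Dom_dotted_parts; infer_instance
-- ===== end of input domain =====

-- B replaces A's recursion over repeated partition(".") with one split('.') plus a single flat loop.

-- ===== PORT A =====
-- name.partition('.') on the char level: (pre, found-a-dot?, post)
def pvPartitionDot : List Char → List Char × Bool × List Char
  | [] => ([], false, [])
  | c :: cs =>
    if c = '.' then ([], true, cs)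
    else
      let r := pvPartitionDot cs
      (c :: r.1, r.2.1, r.2.2)

-- termination measure for the recursion of A (cited by the port's decreasing_by)
theorem pvPartitionDot_post_lt (cs : List Char) (h : (pvPartitionDot cs).2.2 ≠ []) :
    (pvPartitionDot cs).2.2.length < cs.length := by
  induction cs with
  | nil => simp [pvPartitionDot] at h
  | cons c cs ih =>
    by_cases hc : c = '.'
    · simp [pvPartitionDot, hc]
    · simp only [pvPartitionDot, if_neg hc] at h ⊢
      exact Nat.lt_succ_of_lt (ih h)

def dottedPartsCore (cs : List Char) : List String :=
  let pre := (pvPartitionDot cs).1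
  let dot := (pvPartitionDot cs).2.1
  let post := (pvPartitionDot cs).2.2
  let post_parts := if h : post ≠ [] then dottedPartsCore post else []
  (if pre ≠ [] then [String.mk pre] else []) ++
  (if pre ≠ [] ∧ dot = true then ["."] else []) ++
  (if post_parts ≠ [] then post_parts else [])
termination_by cs.length
decreasing_by exact pvPartitionDot_post_lt cs h

def dotted_parts (name : String) : List String := dottedPartsCore name.toList

-- ===== PORT B =====
def dotted_parts_alt (name : String) : List String :=
  let parts := name.toList.splitOn '.'
  let out := (PySem.List.slice parts none (some (-1))).foldl
    (fun out seg => if seg ≠ [] then (out ++ [String.mk seg]) ++ ["."] else out) []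
  match PySem.List.pyGet? parts (-1) with
  | some last => if last ≠ [] then out ++ [String.mk last] else out
  | none => out  -- unreachable: split never returns an empty list

-- ===== PRECONDITION & SPEC =====
def Spec_dotted_parts (name : String) (out : List String) : Prop := out = dotted_parts_alt name
instance (name : String) (out : List String) : Decidable (Spec_dotted_parts name out) := by unfold Spec_dotted_parts; infer_instance

-- ===== CLAIM (what is proved, stated in full; the proofs are below) =====
def Claim_equal_dotted_parts : Prop := ∀ (name : String), Dom_dotted_parts name → Spec_dotted_parts name (dotted_parts name)

-- ===== LEMMAS AND PROOFS =====

-- reference form of B's pass: head-of-list recursion over the split segments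
def pvJoin : List (List Char) → List String
  | [] => []
  | [p] => if p ≠ [] then [String.mk p] else []
  | p :: q :: r => (if p ≠ [] then [String.mk p, "."] else []) ++ pvJoin (q :: r)

theorem pvPartitionDot_post_nil (cs : List Char) (h : (pvPartitionDot cs).2.1 = false) :
    (pvPartitionDot cs).2.2 = [] := by
  induction cs with
  | nil => simp [pvPartitionDot]
  | cons c cs ih =>
    by_cases hc : c = '.'
    · simp [pvPartitionDot, hc] at h
    · simp only [pvPartitionDot, if_neg hc] at h ⊢
      exact ih h

theorem splitOn_partition (cs : List Char) :
    cs.splitOn '.' =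
      (pvPartitionDot cs).1 ::
        (if (pvPartitionDot cs).2.1 = true then (pvPartitionDot cs).2.2.splitOn '.' else []) := by
  induction cs with
  | nil => simp [pvPartitionDot, List.splitOn_nil]
  | cons c cs ih =>
    by_cases hc : c = '.'
    · simp [pvPartitionDot, hc, List.splitOn, List.splitOnP_cons]
    · simp only [pvPartitionDot, if_neg hc, List.splitOn, List.splitOnP_cons, beq_iff_eq]
      rw [List.splitOn] at ih
      rw [ih]
      rfl

theorem foldl_acc (f : List String → List Char → List String)
    (hf : ∀ acc seg, f acc seg = acc ++ f [] seg) :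
    ∀ (l : List (List Char)) (acc : List String), l.foldl f acc = acc ++ l.foldl f [] := by
  intro l
  induction l with
  | nil => simp
  | cons x l ih =>
    intro acc
    rw [List.foldl_cons, List.foldl_cons, ih, ih (f [] x), hf acc x, List.append_assoc]

theorem alt_join_aux (parts : List (List Char)) (h : parts ≠ []) :
    (match PySem.List.pyGet? parts (-1) with
      | some last =>
        if last ≠ [] then
          (parts.dropLast.foldl
            (fun out seg => if seg ≠ [] then (out ++ [String.mk seg]) ++ ["."] else out) []) ++
            [String.mk last]
        else
          parts.dropLast.foldl
            (fun out seg => if seg ≠ [] then (out ++ [String.mk seg]) ++ ["."] else out) []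
      | none =>
        parts.dropLast.foldl
          (fun out seg => if seg ≠ [] then (out ++ [String.mk seg]) ++ ["."] else out) []) =
    pvJoin parts := by
  induction parts with
  | nil => exact absurd rfl h
  | cons p rest ih =>
    cases rest with
    | nil =>
      show (if p ≠ [] then ([] : List String) ++ [String.mk p] else []) = _
      simp only [pvJoin]
      split_ifs <;> simp
    | cons q r =>
      have hne : q :: r ≠ [] := by simp
      have hlast : PySem.List.pyGet? (p :: q :: r) (-1) = PySem.List.pyGet? (q :: r) (-1) := by
        simp [PySem.List.pyGet?_neg_one, List.getLast?_cons_cons]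
      have hdrop : (p :: q :: r).dropLast = p :: (q :: r).dropLast := by
        simp [List.dropLast_cons_of_ne_nil hne]
      have hacc := foldl_acc
        (fun out seg => if seg ≠ [] then (out ++ [String.mk seg]) ++ ["."] else out)
        (by intro acc seg; by_cases hs : seg = [] <;> simp [hs])
      rw [hlast, hdrop]
      specialize ih hne
      cases hg : PySem.List.pyGet? (q :: r) (-1) with
      | none =>
        rw [PySem.List.pyGet?_neg_one] at hg
        simp [List.getLast?_eq_none_iff] at hg
      | some last =>
        rw [hg] at ih
        simp only [hg, List.foldl_cons]
        by_cases hl : last = []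
        · simp only [hl] at ih ⊢
          simp only [ne_eq, not_true_eq_false, if_false] at ih ⊢
          rw [hacc]
          by_cases hp : p = [] <;> simp [hp, pvJoin] <;> simpa using ih
        · simp only [ne_eq, hl, not_false_eq_true, if_true] at ih ⊢
          rw [hacc]
          by_cases hp : p = [] <;> simp [hp, pvJoin, ← ih]

theorem alt_eq_join (name : String) : dotted_parts_alt name = pvJoin (name.toList.splitOn '.') := by
  have h := List.splitOnP_ne_nil (fun c => c == '.') name.toList
  unfold dotted_parts_alt
  simp only [PySem.List.slice_to_neg_one]
  exact alt_join_aux (name.toList.splitOn '.') h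

theorem core_eq_join (cs : List Char) : dottedPartsCore cs = pvJoin (cs.splitOn '.') := by
  induction hn : cs.length using Nat.strong_induction_on generalizing cs with
  | _ n ih =>
  subst hn
  rw [dottedPartsCore, splitOn_partition cs]
  cases hd : (pvPartitionDot cs).2.1 with
  | false =>
    have hpost := pvPartitionDot_post_nil cs hd
    simp only [hpost, hd, ne_eq, not_true_eq_false, if_false, Bool.false_eq_true,
      and_false, dif_neg, List.append_nil, pvJoin]
    by_cases hp : (pvPartitionDot cs).1 = [] <;> simp [hp]
  | true =>
    have hlt : ∀ h : (pvPartitionDot cs).2.2 ≠ [],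
        (pvPartitionDot cs).2.2.length < cs.length := fun h => pvPartitionDot_post_lt cs h
    simp only [hd, if_true, and_true]
    by_cases hpost : (pvPartitionDot cs).2.2 = []
    · simp only [hpost, ne_eq, not_true_eq_false, if_false, dif_neg, List.splitOn_nil]
      simp only [pvJoin]
      by_cases hp : (pvPartitionDot cs).1 = [] <;> simp [hp, pvJoin]
    · rw [dif_pos hpost, ih _ (hlt hpost) _ rfl]
      have hsplit := List.splitOnP_ne_nil (fun c => c == '.') (pvPartitionDot cs).2.2
      cases hq : (pvPartitionDot cs).2.2.splitOn '.' with
      | nil => exact absurd hq hsplit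
      | cons q r =>
        simp only [pvJoin]
        by_cases hp : (pvPartitionDot cs).1 = [] <;>
          by_cases hj : pvJoin (q :: r) = [] <;> simp [hp, hj]

-- ===== VERDICT (by name: the statement is the Claim_ definition above) =====
theorem dotted_parts_spec : Claim_equal_dotted_parts := by
  intro name _
  unfold Spec_dotted_parts
  rw [dotted_parts, core_eq_join, alt_eq_join]
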